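-- pv_equiv track=rewrite | github.com/yogeshPbawankar/Coding20_Yogesh_Bawankar | Array_Problem/arrangingFrontBackString.py | repeateFrontBackWord
-- ===== SOURCE A (Python) =====
-- def repeateFrontBackWord(line):
--     f3 = line[:3]
--     l3 = line[-3:]
--     n = len(line)
--     i = ""
--     while len(i) < n:
--         i += l3
--         i += f3
--     return i
-- ===== SOURCE B (Python) =====
-- def repeateFrontBackWord(line):
--     if not line:
--         return ""
--     chunk = line[-3:] + line[:3]
--     n = len(line)
--     reps = (n + len(chunk) - 1) // len(chunk)
--     return chunk * reps
-- ===== Notes on version B (the rewrite author's own statement) =====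
-- stated objective: faster
-- what changed: Replaces the quadratic append-until-long-enough while loop by a closed form: compute the repeat count ceil(n/len(chunk)) and build chunk*reps in one string-repetition.
import Mathlib
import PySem

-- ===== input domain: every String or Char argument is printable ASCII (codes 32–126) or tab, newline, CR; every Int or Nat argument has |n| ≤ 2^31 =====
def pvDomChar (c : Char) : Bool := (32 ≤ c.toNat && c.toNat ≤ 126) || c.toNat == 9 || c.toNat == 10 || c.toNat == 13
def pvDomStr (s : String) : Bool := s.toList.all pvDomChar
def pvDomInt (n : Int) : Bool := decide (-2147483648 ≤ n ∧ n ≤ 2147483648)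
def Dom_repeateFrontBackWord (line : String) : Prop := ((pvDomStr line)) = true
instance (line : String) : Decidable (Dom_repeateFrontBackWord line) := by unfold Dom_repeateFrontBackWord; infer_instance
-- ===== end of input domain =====

-- B replaces A's quadratic append-until-long-enough loop by the closed form chunk * ceil(n/len(chunk)) (objective: faster).

-- ===== PORT A =====
-- the while loop of A, fuel-bounded (fuel n+1 always suffices: each iteration grows i by ≥ 2 when line ≠ '')
def repFBLoopA (l3 f3 : List Char) (n : Nat) : Nat → List Char → List Char
  | 0, i => i
  | fuel + 1, i => if i.length < n then repFBLoopA l3 f3 n fuel (i ++ l3 ++ f3) else i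

def repeateFrontBackWord (line : String) : String :=
  let cs := line.toList
  let f3 := PySem.List.slice cs none (some 3)
  let l3 := PySem.List.slice cs (some (-3)) none
  let n := cs.length
  String.ofList (repFBLoopA l3 f3 n (n + 1) [])

-- ===== PORT B =====
def repeateFrontBackWord_alt (line : String) : String :=
  let cs := line.toList
  if cs = [] then ""
  else
    let chunk := PySem.List.slice cs (some (-3)) none ++ PySem.List.slice cs none (some 3)
    let n := cs.length
    let reps := (n + chunk.length - 1) / chunk.length
    String.ofList (List.flatten (List.replicate reps chunk))

-- ===== PRECONDITION & SPEC =====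
def Spec_repeateFrontBackWord (line : String) (out : String) : Prop := out = repeateFrontBackWord_alt line
instance (line : String) (out : String) : Decidable (Spec_repeateFrontBackWord line out) := by unfold Spec_repeateFrontBackWord; infer_instance

-- ===== CLAIM (what is proved, stated in full; the proofs are below) =====
def Claim_equal_repeateFrontBackWord : Prop := ∀ (line : String), Dom_repeateFrontBackWord line → Spec_repeateFrontBackWord line (repeateFrontBackWord line)

-- ===== LEMMAS AND PROOFS =====

theorem repFB_len_flatten_replicate (j : Nat) (c : List Char) :
    (List.flatten (List.replicate j c)).length = j * c.length := by
  induction j with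
  | zero => simp
  | succ j ih => simp [List.replicate_succ, ih, Nat.succ_mul]; ring

theorem repFB_flatten_replicate_succ (j : Nat) (c : List Char) :
    List.flatten (List.replicate j c) ++ c = List.flatten (List.replicate (j + 1) c) := by
  induction j with
  | zero => simp
  | succ j ih => simp [List.replicate_succ, List.append_assoc, ih]

theorem repFB_loop_spec (l3 f3 : List Char) (n : Nat) (hL : 0 < (l3 ++ f3).length)
    (k : Nat) (hk : k = (n + (l3 ++ f3).length - 1) / (l3 ++ f3).length) :
    ∀ (fuel j : Nat), k ≤ j + fuel →
      repFBLoopA l3 f3 n fuel (List.flatten (List.replicate j (l3 ++ f3)))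
        = List.flatten (List.replicate (max j k) (l3 ++ f3)) := by
  intro fuel
  set L := (l3 ++ f3).length with hLdef
  induction fuel with
  | zero =>
    intro j hj
    simp only [repFBLoopA]
    have : max j k = j := by omega
    rw [this]
  | succ fuel ih =>
    intro j hj
    simp only [repFBLoopA]
    rw [repFB_len_flatten_replicate]
    by_cases h : j * L < n
    · -- another iteration: j < k
      have hjk : j + 1 ≤ k := by
        rw [hk, Nat.le_div_iff_mul_le hL]
        have : (j + 1) * L = j * L + L := by ring
        omega
      rw [if_pos h]
      have happ : List.flatten (List.replicate j (l3 ++ f3)) ++ l3 ++ f3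
          = List.flatten (List.replicate (j + 1) (l3 ++ f3)) := by
        rw [List.append_assoc]
        exact repFB_flatten_replicate_succ j (l3 ++ f3)
      rw [happ, ih (j + 1) (by omega)]
      have : max (j + 1) k = k := by omega
      rw [this]
      have : max j k = k := by omega
      rw [this]
    · -- done: k ≤ j
      have hkj : k ≤ j := by
        have : k < j + 1 := by
          rw [hk, Nat.div_lt_iff_lt_mul hL]
          have : (j + 1) * L = j * L + L := by ring
          omega
        omega
      rw [if_neg h]
      have : max j k = j := by omega
      rw [this]

theorem repFB_main (line : String) :
    repeateFrontBackWord line = repeateFrontBackWord_alt line := by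
  unfold repeateFrontBackWord repeateFrontBackWord_alt
  by_cases hcs : line.toList = []
  · simp only [hcs]
    simp only [List.length_nil, Nat.zero_add, repFBLoopA]
    rw [if_neg (by omega)]
    rfl
  · simp only [if_neg hcs]
    set cs := line.toList with hcsdef
    have hf3 : PySem.List.slice cs none (some 3) = cs.take 3 := by
      exact_mod_cast PySem.List.slice_to_natCast cs 3
    have hchunkpos : 0 < (PySem.List.slice cs (some (-3)) none ++ PySem.List.slice cs none (some 3)).length := by
      rw [hf3]
      have hcl : 0 < cs.length := List.length_pos_iff.mpr hcs
      simp only [List.length_append, List.length_take]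
      omega
    have := repFB_loop_spec (PySem.List.slice cs (some (-3)) none) (PySem.List.slice cs none (some 3))
      cs.length hchunkpos
      ((cs.length + (PySem.List.slice cs (some (-3)) none ++ PySem.List.slice cs none (some 3)).length - 1)
        / (PySem.List.slice cs (some (-3)) none ++ PySem.List.slice cs none (some 3)).length)
      rfl (cs.length + 1) 0 ?_
    · simpa using congrArg String.ofList this
    · -- k ≤ n + 1 since L ≥ 1
      have hL1 : 1 ≤ (PySem.List.slice cs (some (-3)) none ++ PySem.List.slice cs none (some 3)).length := hchunkpos
      set L := (PySem.List.slice cs (some (-3)) none ++ PySem.List.slice cs none (some 3)).length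
      have : (cs.length + L - 1) / L ≤ cs.length + L - 1 := Nat.div_le_self _ _
      have h2 : (cs.length + L - 1) / L ≤ cs.length := by
        rw [Nat.div_le_iff_le_mul_add_pred hchunkpos]
        have hml : cs.length ≤ L * cs.length := Nat.le_mul_of_pos_left cs.length hchunkpos
        omega
      omega

-- ===== VERDICT (by name: the statement is the Claim_ definition above) =====
theorem repeateFrontBackWord_spec : Claim_equal_repeateFrontBackWord := by
  intro line _
  unfold Spec_repeateFrontBackWord
  exact repFB_main line
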